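-- pv_equiv track=rewrite | github.com/imag1ne/imtd | python/imtd/algo/discovery/inductive/variants/im_td/data_structures/subtree_plain.py | nodes_max_outgoing_edge_weight
-- ===== SOURCE A (Python) =====
-- def nodes_max_outgoing_edge_weight(dfg):
--     # Get the maximum outgoing edge weight for each node in the Directly-Follows Graph (DFG).
--     max_outgoing_edge_weight = {}
--     for (source, target), weight in dfg.items():
--         if source not in max_outgoing_edge_weight:
--             max_outgoing_edge_weight[source] = weight
--         else:
--             max_outgoing_edge_weight[source] = max(max_outgoing_edge_weight[source], weight)
--
--     return max_outgoing_edge_weight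
-- ===== SOURCE B (Python) =====
-- def nodes_max_outgoing_edge_weight(dfg):
--     # Collect-then-reduce: group all outgoing weights per source node in one pass,
--     # then take the max of each group.
--     weights_by_source = {}
--     for (source, _target), weight in dfg.items():
--         weights_by_source.setdefault(source, []).append(weight)
--     return {source: max(weights) for source, weights in weights_by_source.items()}
-- ===== Notes on version B (the rewrite author's own statement) =====
-- stated objective: alternative
-- what changed: Replaces A's online running-max fold (conditional insert-or-max per edge) with a two-phase collect-then-reduce: one pass groups every weight under its source, a second pass maps max over the groups.
import Mathlib
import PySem

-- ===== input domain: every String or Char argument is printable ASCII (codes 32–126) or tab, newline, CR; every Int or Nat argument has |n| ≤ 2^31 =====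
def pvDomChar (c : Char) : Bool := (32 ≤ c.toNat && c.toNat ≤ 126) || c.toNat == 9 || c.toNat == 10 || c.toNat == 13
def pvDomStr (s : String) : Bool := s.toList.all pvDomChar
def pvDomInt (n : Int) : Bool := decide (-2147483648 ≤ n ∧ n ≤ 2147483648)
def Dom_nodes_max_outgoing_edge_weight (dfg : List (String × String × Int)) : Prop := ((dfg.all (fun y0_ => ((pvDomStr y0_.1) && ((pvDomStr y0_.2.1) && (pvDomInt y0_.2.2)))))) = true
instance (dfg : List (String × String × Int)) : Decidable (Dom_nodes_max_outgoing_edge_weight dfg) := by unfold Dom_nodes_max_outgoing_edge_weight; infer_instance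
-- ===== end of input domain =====

-- B replaces A's online running-max fold by a collect-then-reduce pass (group weights per source, then max each group); objective: alternative decomposition, same cost.

-- ===== PORT A =====
-- one iteration of A's loop body: if source not in d: d[source] = w else: d[source] = max(d[source], w)
def pvStepA (d : PySem.Dict String Int) (x : String × String × Int) : PySem.Dict String Int :=
  if d.contains x.1 = false then d.insert x.1 x.2.2
  else d.insert x.1 (max (d.getD x.1 0) x.2.2)

def nodes_max_outgoing_edge_weight (dfg : List (String × String × Int)) : List (String × Int) :=
  (dfg.foldl pvStepA PySem.Dict.empty).items

-- ===== PORT B =====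
-- Python max(ws) on a nonempty list of ints (the [] branch is unreachable: groups hold ≥ 1 weight)
def pvMaxB (ws : List Int) : Int :=
  match ws with
  | [] => 0
  | x :: r => r.foldl max x

def nodes_max_outgoing_edge_weight_alt (dfg : List (String × String × Int)) : List (String × Int) :=
  -- pass 1: weights_by_source.setdefault(source, []).append(weight)  =  d[source] = d.get(source, []) + [weight]
  let groups := dfg.foldl (fun d x => d.modify x.1 [] (fun ws => ws ++ [x.2.2])) PySem.Dict.empty
  -- pass 2: {source: max(weights) for source, weights in weights_by_source.items()}
  groups.items.map (fun p => (p.1, pvMaxB p.2))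

-- ===== PRECONDITION & SPEC =====
-- Pre_ only states that the association list models a Python dict: the (source, target) keys are
-- distinct (a dict cannot present duplicate keys to the loop); no input A accepts is excluded.
def Pre_nodes_max_outgoing_edge_weight (dfg : List (String × String × Int)) : Prop :=
  (dfg.map (fun t => (t.1, t.2.1))).Nodup
instance (dfg : List (String × String × Int)) : Decidable (Pre_nodes_max_outgoing_edge_weight dfg) := by unfold Pre_nodes_max_outgoing_edge_weight; infer_instance

def pvWitness_nodes_max_outgoing_edge_weight : (List (String × String × Int)) :=
  [("a", "b", 3), ("a", "c", 7), ("b", "a", 2)]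

def Spec_nodes_max_outgoing_edge_weight (dfg : List (String × String × Int)) (out : List (String × Int)) : Prop := out = nodes_max_outgoing_edge_weight_alt dfg
instance (dfg : List (String × String × Int)) (out : List (String × Int)) : Decidable (Spec_nodes_max_outgoing_edge_weight dfg out) := by unfold Spec_nodes_max_outgoing_edge_weight; infer_instance

-- ===== CLAIM (what is proved, stated in full; the proofs are below) =====
def Claim_equal_nodes_max_outgoing_edge_weight : Prop := ∀ (dfg : List (String × String × Int)), Dom_nodes_max_outgoing_edge_weight dfg → Pre_nodes_max_outgoing_edge_weight dfg → Spec_nodes_max_outgoing_edge_weight dfg (nodes_max_outgoing_edge_weight dfg)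

-- ===== LEMMAS AND PROOFS =====

-- A's loop body is a single insert of a computed value
def pvValA (d : PySem.Dict String Int) (x : String × String × Int) : Int :=
  if d.contains x.1 = false then x.2.2 else max (d.getD x.1 0) x.2.2

theorem pvStepA_eq (d : PySem.Dict String Int) (x : String × String × Int) :
    pvStepA d x = d.insert x.1 (pvValA d x) := by
  unfold pvStepA pvValA; split <;> rfl

theorem pvFoldA_eq (l : List (String × String × Int)) (d : PySem.Dict String Int) :
    l.foldl pvStepA d = l.foldl (fun d x => d.insert x.1 (pvValA d x)) d := by
  have : pvStepA = fun d x => d.insert x.1 (pvValA d x) :=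
    funext fun d => funext fun x => pvStepA_eq d x
  rw [this]

-- the option-valued running max A maintains at one key
def pvRunMax (o : Option Int) (ws : List Int) : Option Int :=
  ws.foldl (fun o w => some (match o with | none => w | some m => max m w)) o

theorem pvRunMax_some (m : Int) (ws : List Int) :
    pvRunMax (some m) ws = some (ws.foldl max m) := by
  induction ws generalizing m with
  | nil => rfl
  | cons w r ih => simpa [pvRunMax, List.foldl] using ih (max m w)

theorem pvRunMax_ne_nil (ws : List Int) (h : ws ≠ []) :
    pvRunMax none ws = some (pvMaxB ws) := by
  cases ws with
  | nil => exact absurd rfl h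
  | cons x r =>
    show pvRunMax (some x) r = _
    rw [pvRunMax_some]; rfl

theorem pvA_get (l : List (String × String × Int)) (d : PySem.Dict String Int) (k : String) :
    (l.foldl pvStepA d).get? k =
      pvRunMax (d.get? k) ((l.filter (fun t => t.1 == k)).map (fun t => t.2.2)) := by
  induction l generalizing d with
  | nil => rfl
  | cons x l ih =>
    rw [List.foldl_cons, ih]
    by_cases hx : x.1 = k
    · have hins : (pvStepA d x).get? k = some (pvValA d x) := by
        rw [pvStepA_eq, PySem.Dict.get?_insert, if_pos hx.symm]
      have hval : pvValA d x =
          (match d.get? k with | none => x.2.2 | some m => max m x.2.2) := by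
        unfold pvValA
        rw [hx, PySem.Dict.contains_eq_isSome_get?, PySem.Dict.getD_eq_get?_getD]
        cases d.get? k <;> rfl
      have hfil : (x :: l).filter (fun t => t.1 == k) = x :: l.filter (fun t => t.1 == k) := by
        simp [hx]
      rw [hfil, List.map_cons, hins, hval]
      show pvRunMax _ _ = pvRunMax (some _) _
      cases d.get? k <;> rfl
    · have hins : (pvStepA d x).get? k = d.get? k := by
        rw [pvStepA_eq, PySem.Dict.get?_insert, if_neg (fun h => hx h.symm)]
      have hfil : (x :: l).filter (fun t => t.1 == k) = l.filter (fun t => t.1 == k) := by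
        simp [hx]
      rw [hfil, hins]

-- B's grouping pass, characterised through the library lemmas via foldl over the mapped pair list
theorem pvB_getD (l : List (String × String × Int)) (k : String) :
    (l.foldl (fun d x => d.modify x.1 [] (fun ws => ws ++ [x.2.2]))
        (PySem.Dict.empty : PySem.Dict String (List Int))).getD k [] =
      (l.filter (fun t => t.1 == k)).map (fun t => t.2.2) := by
  have h := PySem.Dict.getD_foldl_modify_append (l.map (fun t => (t.1, t.2.2)))
      (PySem.Dict.empty : PySem.Dict String (List Int)) k
  rw [List.foldl_map] at h
  simpa [List.filter_map, Function.comp] using h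

theorem pvKeysA (l : List (String × String × Int)) :
    (l.foldl pvStepA (PySem.Dict.empty : PySem.Dict String Int)).keys =
      PySem.Set.update [] (l.map (fun t => t.1)) := by
  rw [pvFoldA_eq]
  exact PySem.Dict.keys_foldl_insert_key l (fun t => t.1) pvValA _

theorem pvKeysB (l : List (String × String × Int)) :
    (l.foldl (fun d x => d.modify x.1 [] (fun ws => ws ++ [x.2.2]))
        (PySem.Dict.empty : PySem.Dict String (List Int))).keys =
      PySem.Set.update [] (l.map (fun t => t.1)) := by
  have h := PySem.Dict.keys_foldl_modify_key (l.map (fun t => (t.1, t.2.2)))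
      (fun p => p.1) [] (fun _ p ws => ws ++ [p.2])
      (PySem.Dict.empty : PySem.Dict String (List Int))
  rw [List.foldl_map] at h
  simpa [List.map_map, Function.comp] using h

theorem nodes_spec_aux (dfg : List (String × String × Int)) :
    nodes_max_outgoing_edge_weight dfg = nodes_max_outgoing_edge_weight_alt dfg := by
  show (dfg.foldl pvStepA PySem.Dict.empty).items =
    (dfg.foldl (fun d x => d.modify x.1 [] (fun ws => ws ++ [x.2.2]))
        (PySem.Dict.empty : PySem.Dict String (List Int))).items.map (fun p => (p.1, pvMaxB p.2))
  set dA := dfg.foldl pvStepA (PySem.Dict.empty : PySem.Dict String Int) with hdA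
  set dB := dfg.foldl (fun d x => d.modify x.1 [] (fun ws => ws ++ [x.2.2]))
      (PySem.Dict.empty : PySem.Dict String (List Int)) with hdB
  have hndA : dA.keys.Nodup := by
    rw [hdA, pvFoldA_eq]
    exact PySem.Dict.nodup_keys_foldl_insert_key dfg (fun t => t.1) pvValA _
      PySem.Dict.nodup_keys_empty
  have hndB : dB.keys.Nodup := by
    have h := PySem.Dict.nodup_keys_foldl_modify_key (dfg.map (fun t => (t.1, t.2.2)))
        (fun p => p.1) [] (fun _ p ws => ws ++ [p.2])
        (PySem.Dict.empty : PySem.Dict String (List Int)) PySem.Dict.nodup_keys_empty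
    rw [List.foldl_map] at h
    exact h
  rw [PySem.Dict.items_eq_map_keys dA hndA 0, PySem.Dict.items_eq_map_keys dB hndB [],
    List.map_map]
  have hkeys : dA.keys = dB.keys := by rw [hdA, hdB, pvKeysA, pvKeysB]
  rw [hkeys]
  apply List.map_congr_left
  intro k hk
  have hkmem : k ∈ dfg.map (fun t => t.1) := by
    rw [hdB, pvKeysB] at hk
    have := (PySem.Set.mem_update ([] : PySem.Set String) (dfg.map (fun t => t.1)) k).mp hk
    simpa using this
  have hne : (dfg.filter (fun t => t.1 == k)).map (fun t => t.2.2) ≠ [] := by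
    obtain ⟨t, ht, hteq⟩ := List.mem_map.mp hkmem
    intro hnil
    have : t ∈ dfg.filter (fun t => t.1 == k) := List.mem_filter.mpr ⟨ht, by simp [hteq]⟩
    simp [List.map_eq_nil_iff.mp hnil] at this
  have hA : dA.getD k 0 = pvMaxB ((dfg.filter (fun t => t.1 == k)).map (fun t => t.2.2)) := by
    rw [PySem.Dict.getD_eq_get?_getD, hdA, pvA_get, PySem.Dict.get?_empty,
      pvRunMax_ne_nil _ hne]
    rfl
  have hB : dB.getD k [] = (dfg.filter (fun t => t.1 == k)).map (fun t => t.2.2) := by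
    rw [hdB]; exact pvB_getD dfg k
  simp only [Function.comp]
  rw [hA, hB]

-- ===== VERDICT (by name: the statement is the Claim_ definition above) =====
theorem nodes_max_outgoing_edge_weight_spec : Claim_equal_nodes_max_outgoing_edge_weight := by
  intro dfg _ _
  unfold Spec_nodes_max_outgoing_edge_weight
  exact nodes_spec_aux dfg
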